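-- pv_equiv track=rewrite | github.com/GDSCINHA/2022_1-Algorithm-Study | 김은행/7주차/[PGS] 92334.py | solution
-- ===== SOURCE A (Python) =====
-- def solution(id_list, report, k):
--     ##### 1 #####
--     answer = [ 0 for _ in range(len(id_list)) ]
--     user_dic = { id_list[_] : _ for _ in range(len(id_list)) }
--     modified_report = { _ : 1 for _ in report }                     # 중복이 삭제된 딕셔너리
--     report_log = [ key for key in modified_report.keys() ]          # 중복이 삭제된 리스트
--     report_count = { id_list[_] : 0 for _ in range(len(id_list)) }  # 0으로 초기화된 카운트 딕셔너리
--
--     ##### 2 #####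
--     for _ in report_log: # 신고 횟수를 닉네임이 key인 딕셔너리에 +1
--         reported_id = _.split()[1]
--         report_count[reported_id] += 1
--
--     ##### 3 #####
--     for key in report_count: # #2의 결과가 k와 같거나 클 경우 bool인 1로 바꾸기 아니라면 0으로
--         if report_count[key] >= k:
--             report_count[key] = 1
--         else:
--             report_count[key] = 0
--
--     ##### 4 #####
--     for log in report_log: # 모든 log 를 확인하고 report_count가 1인 유저를 신고했다면 메일 받을 횟수 +1
--         reporter_id = log.split()[0]
--         reported_id = log.split()[1]
--         if report_count[reported_id] == 1:
--             answer[user_dic[reporter_id]] += 1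
--
--     return answer
-- ===== SOURCE B (Python) =====
-- def solution(id_list, report, k):
--     answer = [0] * len(id_list)
--     user_dic = {u: i for i, u in enumerate(id_list)}
--     reported = {}
--     for log in dict.fromkeys(report):
--         tokens = log.split()
--         reported.setdefault(tokens[1], []).append(tokens[0])
--     for reporters in reported.values():
--         if len(reporters) >= k:
--             for r in reporters:
--                 answer[user_dic[r]] += 1
--     return answer
-- ===== Notes on version B (the rewrite author's own statement) =====
-- stated objective: simpler
-- what changed: B replaces A's four dictionary passes (dedup dict, zero-initialised per-user counter, 0/1 threshold rewrite of that counter, second scan of all logs) by one grouping dict target -> list of reporters built in a single pass over the deduplicated logs, then credits each group of size >= k directly.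
import Mathlib
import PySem

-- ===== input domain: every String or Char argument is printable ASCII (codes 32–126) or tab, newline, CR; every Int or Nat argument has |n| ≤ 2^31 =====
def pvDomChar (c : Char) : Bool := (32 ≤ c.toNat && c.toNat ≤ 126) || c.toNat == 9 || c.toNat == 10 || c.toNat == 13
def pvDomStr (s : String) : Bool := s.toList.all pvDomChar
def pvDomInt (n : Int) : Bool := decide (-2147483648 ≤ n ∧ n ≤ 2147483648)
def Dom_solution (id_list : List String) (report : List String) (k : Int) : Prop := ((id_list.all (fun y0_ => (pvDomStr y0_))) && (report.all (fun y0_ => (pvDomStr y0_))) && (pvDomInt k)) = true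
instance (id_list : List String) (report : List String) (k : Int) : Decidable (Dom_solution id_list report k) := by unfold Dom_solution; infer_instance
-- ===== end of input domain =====

-- B replaces A's four dictionary passes (dedup dict, per-user zero counter, 0/1 threshold rewrite,
-- re-scan of all logs) by one grouping dict target ↦ list of reporters, then credits each large
-- enough group directly; equal return value on every input where A returns (Pre_solution).

-- ===== PORT A =====
def solution (id_list : List String) (report : List String) (k : Int) : List Int :=
  let answer : List Int := (PySem.List.pyRange 0 (id_list.length : Int) 1).map (fun _ => (0 : Int))
  let user_dic : PySem.Dict String Int :=
    (PySem.List.pyRange 0 (id_list.length : Int) 1).foldl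
      (fun d i => d.insert (PySem.List.pyGetD id_list i "") i) PySem.Dict.empty
  let modified_report : PySem.Dict String Int :=
    report.foldl (fun d s => d.insert s 1) PySem.Dict.empty
  let report_log : List String := modified_report.keys
  let report_count : PySem.Dict String Int :=
    (PySem.List.pyRange 0 (id_list.length : Int) 1).foldl
      (fun d i => d.insert (PySem.List.pyGetD id_list i "") 0) PySem.Dict.empty
  -- 'report_count[reported_id] += 1' (KeyError on an absent key is excluded by Pre_solution)
  let report_count1 := report_log.foldl
      (fun d s => d.modify ((PySem.List.pyGet? (PySem.Str.split₀ s) 1).getD "") 0 (· + 1)) report_count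
  -- 'for key in report_count': only values change, so the key sequence is the dict's key list
  let report_count2 := report_count1.keys.foldl
      (fun d key => if k ≤ d.getD key 0 then d.insert key (1 : Int) else d.insert key 0) report_count1
  report_log.foldl
    (fun ans log =>
      let reporter := (PySem.List.pyGet? (PySem.Str.split₀ log) 0).getD ""
      let reported := (PySem.List.pyGet? (PySem.Str.split₀ log) 1).getD ""
      if report_count2.getD reported 0 == 1 then
        let i := user_dic.getD reporter 0
        PySem.List.pySetD ans i (PySem.List.pyGetD ans i 0 + 1)
      else ans) answer

-- ===== PORT B =====
def solution_alt (id_list : List String) (report : List String) (k : Int) : List Int :=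
  let answer : List Int := PySem.List.pyRepeat [(0 : Int)] (id_list.length : Int)
  let user_dic : PySem.Dict String Int :=
    (PySem.List.enumerate id_list 0).foldl (fun d p => d.insert p.2 p.1) PySem.Dict.empty
  let reported : PySem.Dict String (List String) :=
    (PySem.List.dedup report).foldl
      (fun d log =>
        let tokens := PySem.Str.split₀ log
        -- reported.setdefault(tokens[1], []).append(tokens[0])  ==  d[t] = d.get(t, []) + [r]
        d.modify ((PySem.List.pyGet? tokens 1).getD "") [] (· ++ [(PySem.List.pyGet? tokens 0).getD ""]))
      PySem.Dict.empty
  reported.values.foldl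
    (fun ans reporters =>
      if k ≤ (reporters.length : Int) then
        reporters.foldl (fun a r =>
          let i := user_dic.getD r 0
          PySem.List.pySetD a i (PySem.List.pyGetD a i 0 + 1)) ans
      else ans) answer

-- ===== PRECONDITION & SPEC =====
-- the reported user of a log, log.split()[1] (as the port reads it; "" only off Pre_)
def pvTgt (log : String) : String := (PySem.List.pyGet? (PySem.Str.split₀ log) 1).getD ""
-- the reporting user of a log, log.split()[0]
def pvRep (log : String) : String := (PySem.List.pyGet? (PySem.Str.split₀ log) 0).getD ""

-- Pre_solution = exactly the inputs where A returns: every log has ≥ 2 tokens, every reported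
-- user is a known id, and the reporter of any log whose reported user gathers ≥ k distinct
-- reports is a known id (otherwise A raises KeyError / IndexError).
def Pre_solution (id_list : List String) (report : List String) (k : Int) : Prop :=
  ∀ log ∈ report,
    2 ≤ (PySem.Str.split₀ log).length ∧ pvTgt log ∈ id_list ∧
    (k ≤ ((PySem.List.dedup report).countP (fun l => pvTgt l == pvTgt log) : Int) →
      pvRep log ∈ id_list)
instance (id_list : List String) (report : List String) (k : Int) : Decidable (Pre_solution id_list report k) := by unfold Pre_solution; infer_instance

def pvWitness_solution : List String × List String × Int := (["a", "b"], ["a b"], 1)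

def Spec_solution (id_list : List String) (report : List String) (k : Int) (out : List Int) : Prop := out = solution_alt id_list report k
instance (id_list : List String) (report : List String) (k : Int) (out : List Int) : Decidable (Spec_solution id_list report k out) := by unfold Spec_solution; infer_instance

-- ===== CLAIM (what is proved, stated in full; the proofs are below) =====
def Claim_equal_solution : Prop := ∀ (id_list : List String) (report : List String) (k : Int), Dom_solution id_list report k → Pre_solution id_list report k → Spec_solution id_list report k (solution id_list report k)

-- ===== LEMMAS AND PROOFS =====

-- shared increment 'answer[i] += 1' at a Nat index
def pvInc (a : List Int) (i : Nat) : List Int := a.set i (a.getD i 0 + 1)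

-- A's user_dic (proved equal to B's below)
def pvUd (id_list : List String) : PySem.Dict String Int :=
  (PySem.List.pyRange 0 (id_list.length : Int) 1).foldl
    (fun d i => d.insert (PySem.List.pyGetD id_list i "") i) PySem.Dict.empty

def pvH (id_list : List String) (log : String) : Nat := ((pvUd id_list).getD (pvRep log) 0).toNat

def pvCnt (report : List String) (t : String) : Nat :=
  (PySem.List.dedup report).countP (fun l => pvTgt l == t)

def pvQ (report : List String) (k : Int) (log : String) : Bool :=
  decide (k ≤ (pvCnt report (pvTgt log) : Int))

lemma pvInc_comm (a : List Int) (i j : Nat) : pvInc (pvInc a i) j = pvInc (pvInc a j) i := by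
  by_cases h : i = j
  · subst h; rfl
  · simp only [pvInc, List.getD_eq_getElem?_getD, List.getElem?_set_ne h,
      List.getElem?_set_ne (Ne.symm h)]
    rw [List.set_comm _ _ h]

lemma pv_getD_nonneg (f : Int → String) :
    ∀ (l : List Int), (∀ x ∈ l, 0 ≤ x) → ∀ (d : PySem.Dict String Int),
      (∀ v, 0 ≤ d.getD v 0) → ∀ r, 0 ≤ (l.foldl (fun d i => d.insert (f i) i) d).getD r 0 := by
  intro l
  induction l with
  | nil => intro _ d hd r; exact hd r
  | cons x xs ih =>
    intro hl d hd r
    refine ih (fun y hy => hl y (List.mem_cons_of_mem _ hy)) _ ?_ r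
    intro v
    rw [PySem.Dict.getD_insert]
    split
    · exact hl x List.mem_cons_self
    · exact hd v

lemma pv_ud_nonneg (id_list : List String) : ∀ r, 0 ≤ (pvUd id_list).getD r 0 := by
  refine pv_getD_nonneg _ _ ?_ _ ?_
  · intro x hx
    exact (PySem.List.mem_pyRange_one.mp hx).1
  · intro v; rw [PySem.Dict.getD_empty]

lemma pv_getD_zero {β : Type} (f : β → String) :
    ∀ (l : List β) (d : PySem.Dict String Int), (∀ v, d.getD v 0 = 0) →
      ∀ t, (l.foldl (fun d x => d.insert (f x) (0 : Int)) d).getD t 0 = 0 := by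
  intro l
  induction l with
  | nil => intro d hd t; exact hd t
  | cons x xs ih =>
    intro d hd t
    refine ih _ ?_ t
    intro v
    rw [PySem.Dict.getD_insert]
    split <;> simp [hd]

lemma pv_update_of_subset :
    ∀ (xs : List String) (s : PySem.Set String), (∀ x ∈ xs, x ∈ s) → PySem.Set.update s xs = s := by
  intro xs
  induction xs with
  | nil => intro s _; rfl
  | cons x xs ih =>
    intro s hs
    have h1 : PySem.Set.add s x = s := PySem.Set.add_of_mem (hs x List.mem_cons_self)
    show PySem.Set.update (PySem.Set.add s x) xs = s
    rw [h1]
    exact ih s (fun y hy => hs y (List.mem_cons_of_mem _ hy))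

-- the threshold pass: each present key is normalised to 1/0, read from the pre-pass value
lemma pv_thresh (k : Int) :
    ∀ (K : List String), K.Nodup → ∀ (d : PySem.Dict String Int) (t : String),
      (K.foldl (fun d key => if k ≤ d.getD key 0 then d.insert key (1 : Int) else d.insert key 0) d).getD t 0
      = if t ∈ K then (if k ≤ d.getD t 0 then (1 : Int) else 0) else d.getD t 0 := by
  intro K
  induction K with
  | nil => intro _ d t; simp
  | cons k0 K' ih =>
    intro hnd d t
    rw [List.foldl_cons, ih (List.nodup_cons.mp hnd).2]
    have hd' : ∀ s, (if k ≤ d.getD k0 0 then d.insert k0 (1 : Int) else d.insert k0 0).getD s 0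
        = if s = k0 then (if k ≤ d.getD k0 0 then (1 : Int) else 0) else d.getD s 0 := by
      intro s
      by_cases hk : k ≤ d.getD k0 0 <;> by_cases hs : s = k0 <;>
        simp [hk, hs, PySem.Dict.getD_insert]
    by_cases htK : t ∈ K'
    · have htk0 : t ≠ k0 := fun h => (List.nodup_cons.mp hnd).1 (h ▸ htK)
      simp [htK, hd', htk0, List.mem_cons]
    · by_cases htk0 : t = k0
      · subst htk0; simp [htK, hd']
      · simp [htK, hd', htk0, List.mem_cons]

-- grouping a list by key values drawn from a duplicate-free key list is a permutation
lemma pv_group_perm {α κ : Type} [DecidableEq κ] (key : α → κ) :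
    ∀ (T : List κ), T.Nodup → ∀ (L : List α), (∀ x ∈ L, key x ∈ T) →
      (T.flatMap fun t => L.filter (fun x => key x == t)).Perm L := by
  intro T
  induction T with
  | nil =>
    intro _ L hL
    cases L with
    | nil => simp
    | cons x xs => exact absurd (hL x List.mem_cons_self) (by simp)
  | cons t0 T' ih =>
    intro hnd L hL
    rw [List.flatMap_cons]
    have hcongr : (T'.flatMap fun t => L.filter (fun x => key x == t))
        = T'.flatMap fun t => (L.filter (fun x => !(key x == t0))).filter (fun x => key x == t) := by
      refine List.flatMap_congr ?_
      intro t ht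
      rw [List.filter_comm]
      refine (List.filter_eq_self.mpr ?_).symm
      intro a ha
      have hat : key a = t := by simpa using (List.mem_filter.mp ha).2
      have : t ≠ t0 := fun h => (List.nodup_cons.mp hnd).1 (h ▸ ht)
      simp [hat, this]
    rw [hcongr]
    have hperm := ih (List.nodup_cons.mp hnd).2 (L.filter (fun x => !(key x == t0)))
      (by
        intro x hx
        have hx2 := (List.mem_filter.mp hx).2
        have := hL x (List.mem_filter.mp hx).1
        rcases List.mem_cons.mp this with h | h
        · simp [h] at hx2
        · exact h)
    exact List.Perm.trans (List.Perm.append_left _ hperm) (List.filter_append_perm _ L)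

-- A reduced: filter the deduplicated logs by the threshold test, then increment reporter slots
lemma pv_A_eq (id_list report : List String) (k : Int) (hpre : Pre_solution id_list report k) :
    solution id_list report k
      = ((((PySem.List.dedup report).filter (pvQ report k)).map (pvH id_list)).foldl pvInc
          (List.replicate id_list.length 0)) := by
  unfold solution
  dsimp only
  have hlog : (List.foldl (fun (d : PySem.Dict String Int) s => d.insert s 1) PySem.Dict.empty
      report).keys = PySem.List.dedup report := by
    rw [PySem.Dict.keys_foldl_insert, PySem.Dict.keys_empty, PySem.List.dedup_eq_ofList,
        PySem.Set.ofList_eq_foldl]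
    rfl
  rw [hlog]
  set D := PySem.List.dedup report with hD
  have ha : (List.map (fun _ => (0 : Int)) (PySem.List.pyRange 0 (id_list.length : Int)))
      = List.replicate id_list.length 0 := by
    rw [PySem.List.pyRange_one, List.map_map]
    simp [Function.comp_def, List.map_const']
  rw [ha]
  have hudA : (List.foldl (fun (d : PySem.Dict String Int) i =>
        d.insert (PySem.List.pyGetD id_list i "") i) PySem.Dict.empty
        (PySem.List.pyRange 0 (id_list.length : Int))) = pvUd id_list := rfl
  rw [hudA]
  set rc0 := List.foldl (fun (d : PySem.Dict String Int) i =>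
      d.insert (PySem.List.pyGetD id_list i "") 0) PySem.Dict.empty
      (PySem.List.pyRange 0 (id_list.length : Int)) with hrc0
  have hrc0keys : rc0.keys = PySem.Set.ofList id_list := by
    rw [hrc0, PySem.Dict.keys_foldl_insert_key, PySem.Dict.keys_empty,
        PySem.List.map_pyGetD_pyRange_zero' id_list "", PySem.Set.ofList_eq_foldl]
    rfl
  have hrc0z : ∀ t, rc0.getD t 0 = 0 := by
    intro t
    rw [hrc0]
    exact pv_getD_zero (fun i => PySem.List.pyGetD id_list i "") _ _
      (fun v => PySem.Dict.getD_empty v 0) t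
  set rc1 := List.foldl (fun (d : PySem.Dict String Int) s =>
      d.modify ((PySem.List.pyGet? (PySem.Str.split₀ s) 1).getD "") 0 fun x => x + 1) rc0 D with hrc1
  have hrc1' : rc1 = List.foldl (fun d x => d.modify x 0 fun v => v + 1) rc0 (D.map pvTgt) := by
    rw [hrc1, List.foldl_map]
    rfl
  have hrc1getD : ∀ t, rc1.getD t 0 = (pvCnt report t : Int) := by
    intro t
    rw [hrc1', PySem.Dict.getD_foldl_modify_add_one, hrc0z, zero_add]
    congr 1
    simp [pvCnt, List.count, List.countP_map, Function.comp_def, hD]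
  have hrc1keys : rc1.keys = PySem.Set.ofList id_list := by
    rw [hrc1', PySem.Dict.keys_foldl_modify, hrc0keys]
    refine pv_update_of_subset _ _ ?_
    intro x hx
    rcases List.mem_map.mp hx with ⟨log, hlg, rfl⟩
    exact (PySem.Set.mem_ofList _ _).mpr
      (hpre log ((PySem.List.mem_dedup _ _).mp (hD ▸ hlg))).2.1
  have hcond : ∀ log ∈ D,
      ((rc1.keys.foldl (fun d key => if k ≤ d.getD key 0 then d.insert key (1 : Int)
          else d.insert key 0) rc1).getD (pvTgt log) 0 == 1) = pvQ report k log := by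
    intro log hlg
    have hmemid : pvTgt log ∈ id_list :=
      (hpre log ((PySem.List.mem_dedup _ _).mp (hD ▸ hlg))).2.1
    have hmem : pvTgt log ∈ rc1.keys := by
      rw [hrc1keys]
      exact (PySem.Set.mem_ofList _ _).mpr hmemid
    rw [pv_thresh k rc1.keys (hrc1keys ▸ PySem.Set.nodup_ofList _) rc1 (pvTgt log),
        if_pos hmem, hrc1getD]
    by_cases hk : k ≤ (pvCnt report (pvTgt log) : Int) <;> simp [pvQ, hk]
  have hinc : ∀ (a : List Int) (r : String),
      PySem.List.pySetD a ((pvUd id_list).getD r 0)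
        (PySem.List.pyGetD a ((pvUd id_list).getD r 0) 0 + 1)
      = pvInc a ((pvUd id_list).getD r 0).toNat := by
    intro a r
    rw [PySem.List.pySetD_of_nonneg _ _ (pv_ud_nonneg id_list r),
        PySem.List.pyGetD_of_nonneg _ _ (pv_ud_nonneg id_list r)]
    rfl
  rw [PySem.List.foldl_congr_mem _ _
        (fun ans log => if pvQ report k log = true then pvInc ans (pvH id_list log) else ans) _ ?_]
  · rw [PySem.List.foldl_if_eq_foldl_filter, ← List.foldl_map (f := pvH id_list) (g := pvInc)]
  · intro acc log hlg
    rw [show ((PySem.List.pyGet? (PySem.Str.split₀ log) 1).getD "") = pvTgt log from rfl,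
        show ((PySem.List.pyGet? (PySem.Str.split₀ log) 0).getD "") = pvRep log from rfl,
        hcond log hlg, hinc]
    rfl

-- B reduced: concatenate the (threshold-passing) groups and increment reporter slots
lemma pv_B_eq (id_list report : List String) (k : Int) :
    solution_alt id_list report k
      = (((PySem.Set.ofList ((PySem.List.dedup report).map pvTgt)).flatMap
            (fun t => (((PySem.List.dedup report).filter (pvQ report k)).filter
              (fun l => pvTgt l == t)).map (pvH id_list))).foldl pvInc
          (List.replicate id_list.length 0)) := by
  unfold solution_alt
  dsimp only
  have hud : (List.foldl (fun (d : PySem.Dict String Int) (p : Int × String) => d.insert p.2 p.1)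
      PySem.Dict.empty (PySem.List.enumerate id_list)) = pvUd id_list := by
    rw [PySem.List.enumerate_eq_map_pyRange id_list "", List.foldl_map]
    rfl
  rw [hud]
  have ha : PySem.List.pyRepeat [(0 : Int)] (id_list.length : Int) = List.replicate id_list.length 0 := by
    rw [PySem.List.pyRepeat_singleton]
    simp
  rw [ha]
  have hrep : (List.foldl (fun (d : PySem.Dict String (List String)) log =>
        d.modify ((PySem.List.pyGet? (PySem.Str.split₀ log) 1).getD "") [] fun x =>
          x ++ [(PySem.List.pyGet? (PySem.Str.split₀ log) 0).getD ""]) PySem.Dict.empty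
        (PySem.List.dedup report))
      = List.foldl (fun d p => d.modify p.1 [] fun x => x ++ [p.2]) PySem.Dict.empty
          ((PySem.List.dedup report).map (fun log => (pvTgt log, pvRep log))) := by
    rw [List.foldl_map]
    rfl
  rw [hrep]
  set D := PySem.List.dedup report with hD
  set R := List.foldl (fun (d : PySem.Dict String (List String)) p => d.modify p.1 [] fun x => x ++ [p.2])
      PySem.Dict.empty (D.map (fun log => (pvTgt log, pvRep log))) with hR
  have hkeys : R.keys = PySem.Set.ofList (D.map pvTgt) := by
    rw [hR, PySem.Dict.keys_foldl_modify_key]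
    rw [PySem.Dict.keys_empty, List.map_map]
    rw [PySem.Set.ofList_eq_foldl]
    rfl
  have hgetD : ∀ t, R.getD t [] = (D.filter (fun l => pvTgt l == t)).map pvRep := by
    intro t
    rw [hR, PySem.Dict.getD_foldl_modify_append, PySem.Dict.getD_empty, List.filter_map,
        List.map_map]
    rfl
  have hvalues : R.values = R.keys.map (fun t => R.getD t []) :=
    PySem.Dict.values_eq_map_keys R (hkeys ▸ PySem.Set.nodup_ofList _) []
  rw [hvalues, hkeys, List.foldl_map]
  have hinc : ∀ (a : List Int) (r : String),
      PySem.List.pySetD a ((pvUd id_list).getD r 0)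
        (PySem.List.pyGetD a ((pvUd id_list).getD r 0) 0 + 1)
      = pvInc a ((pvUd id_list).getD r 0).toNat := by
    intro a r
    rw [PySem.List.pySetD_of_nonneg _ _ (pv_ud_nonneg id_list r),
        PySem.List.pyGetD_of_nonneg _ _ (pv_ud_nonneg id_list r)]
    rfl
  rw [PySem.List.foldl_congr_mem _ _
        (fun ans t => (((D.filter (pvQ report k)).filter (fun l => pvTgt l == t)).map
          (pvH id_list)).foldl pvInc ans) _ ?_]
  · rw [← List.foldl_flatMap]
  · intro acc t _
    rw [hgetD t]
    simp only [hinc]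
    rw [List.foldl_map,
        show (fun (x : List Int) (y : String) => pvInc x ((pvUd id_list).getD (pvRep y) 0).toNat)
          = fun x y => pvInc x (pvH id_list y) from rfl,
        ← List.foldl_map (f := pvH id_list) (g := pvInc)]
    have hlen : ((((D.filter (fun l => pvTgt l == t)).map pvRep).length : Int))
        = (pvCnt report t : Int) := by
      rw [List.length_map, ← List.countP_eq_length_filter]
      rfl
    rw [hlen]
    have hfc : (D.filter (pvQ report k)).filter (fun l => pvTgt l == t)
        = if k ≤ (pvCnt report t : Int) then D.filter (fun l => pvTgt l == t) else [] := by
      rw [List.filter_comm]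
      split
      · refine List.filter_eq_self.mpr ?_
        intro l hl
        have : pvTgt l = t := by simpa using (List.mem_filter.mp hl).2
        simpa [pvQ, this] using ‹k ≤ (pvCnt report t : Int)›
      · refine List.filter_eq_nil_iff.mpr ?_
        intro l hl
        have : pvTgt l = t := by simpa using (List.mem_filter.mp hl).2
        simpa [pvQ, this] using ‹¬ k ≤ (pvCnt report t : Int)›
    rw [hfc]
    split
    · rfl
    · rfl

-- ===== VERDICT (by name: the statement is the Claim_ definition above) =====
theorem solution_spec : Claim_equal_solution := by
  intro id_list report k _ hpre
  unfold Spec_solution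
  rw [pv_A_eq id_list report k hpre, pv_B_eq id_list report k]
  haveI : RightCommutative pvInc := ⟨pvInc_comm⟩
  rw [← List.map_flatMap]
  refine (List.Perm.foldl_eq ?_ _).symm
  refine List.Perm.map _ ?_
  refine pv_group_perm pvTgt _ (PySem.Set.nodup_ofList _) _ ?_
  intro x hx
  exact (PySem.Set.mem_ofList _ _).mpr (List.mem_map_of_mem ((List.mem_filter.mp hx).1))
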